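-- pv_equiv track=rewrite | github.com/noah-kingdom/veritas | core/todo_compression.py | get_canonical_domain
-- ===== SOURCE A (Python) =====
-- from typing import Dict, List, Optional, Set, Tuple, Any
--
-- def get_canonical_domain(tags: List[str]) -> Optional[str]:
--     """タグリストから主要ドメインを決定"""
--     # 優先度順
--     priority = [
--         "LIABILITY", "TERMINATION", "CONFIDENTIAL", "IP",
--         "PAYMENT", "INDEMNITY", "COMPLIANCE", "DISPUTE"
--     ]
--
--     for domain in priority:
--         if domain in tags:
--             return domain
--
--     return tags[0] if tags else None
-- ===== SOURCE B (Python) =====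
-- RANK = {
--     "LIABILITY": 0,
--     "TERMINATION": 1,
--     "CONFIDENTIAL": 2,
--     "IP": 3,
--     "PAYMENT": 4,
--     "INDEMNITY": 5,
--     "COMPLIANCE": 6,
--     "DISPUTE": 7,
-- }
--
-- def get_canonical_domain(tags):
--     """タグリストから主要ドメインを決定"""
--     best = None
--     best_r = 8
--     for t in tags:
--         r = RANK.get(t)
--         if r is not None and r < best_r:
--             best = t
--             best_r = r
--     if best is not None:
--         return best
--     return tags[0] if tags else None
-- ===== Notes on version B (the rewrite author's own statement) =====
-- stated objective: alternative
-- what changed: Instead of scanning the fixed priority list and testing membership of each domain in tags, B makes a single pass over tags, looking each tag up in a precomputed rank dictionary and keeping the lowest-ranked match.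
import Mathlib
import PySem

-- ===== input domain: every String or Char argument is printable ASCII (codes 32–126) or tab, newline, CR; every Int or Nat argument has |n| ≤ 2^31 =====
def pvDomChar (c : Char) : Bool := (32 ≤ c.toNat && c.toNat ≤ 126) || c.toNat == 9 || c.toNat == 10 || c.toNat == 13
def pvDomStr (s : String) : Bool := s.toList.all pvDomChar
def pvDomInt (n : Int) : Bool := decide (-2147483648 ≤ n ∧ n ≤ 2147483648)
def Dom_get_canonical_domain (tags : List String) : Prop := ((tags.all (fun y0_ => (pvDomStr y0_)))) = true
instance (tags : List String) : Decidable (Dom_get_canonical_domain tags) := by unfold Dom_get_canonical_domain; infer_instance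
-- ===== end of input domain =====

-- B replaces A's scan over the fixed priority list (with a membership test per domain) by a
-- single pass over tags maintaining the best-ranked tag via a rank dictionary (objective: alternative).

-- ===== PORT A =====
def pvPriority : List String :=
  ["LIABILITY", "TERMINATION", "CONFIDENTIAL", "IP",
   "PAYMENT", "INDEMNITY", "COMPLIANCE", "DISPUTE"]

-- A's 'for domain in priority: if domain in tags: return domain'
def pvLoopA : List String → List String → Option String
  | [], tags => match tags with | [] => none | t :: _ => some t
  | d :: rest, tags => if tags.contains d then some d else pvLoopA rest tags

def get_canonical_domain (tags : List String) : Option String :=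
  pvLoopA pvPriority tags

-- ===== PORT B =====
def pvRank : PySem.Dict String Int :=
  PySem.Dict.ofList
    [("LIABILITY", 0), ("TERMINATION", 1), ("CONFIDENTIAL", 2), ("IP", 3),
     ("PAYMENT", 4), ("INDEMNITY", 5), ("COMPLIANCE", 6), ("DISPUTE", 7)]

-- B's 'for t in tags: r = RANK.get(t); if r is not None and r < best_r: best, best_r = t, r'
def pvLoopB : List String → Option String → Int → Option String × Int
  | [], best, bestR => (best, bestR)
  | t :: rest, best, bestR =>
    match pvRank.get? t with
    | some r => if r < bestR then pvLoopB rest (some t) r else pvLoopB rest best bestR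
    | none => pvLoopB rest best bestR

def get_canonical_domain_alt (tags : List String) : Option String :=
  match (pvLoopB tags none 8).1 with
  | some b => some b
  | none => match tags with | [] => none | t :: _ => some t

-- ===== PRECONDITION & SPEC =====
def Spec_get_canonical_domain (tags : List String) (out : Option String) : Prop := out = get_canonical_domain_alt tags
instance (tags : List String) (out : Option String) : Decidable (Spec_get_canonical_domain tags out) := by unfold Spec_get_canonical_domain; infer_instance

-- ===== CLAIM (what is proved, stated in full; the proofs are below) =====
def Claim_equal_get_canonical_domain : Prop := ∀ (tags : List String), Dom_get_canonical_domain tags → Spec_get_canonical_domain tags (get_canonical_domain tags)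

-- ===== LEMMAS AND PROOFS =====

-- the possible outcomes of a rank lookup
lemma pvRank_cases (t : String) :
    pvRank.get? t = none ∨
    (t = "LIABILITY" ∧ pvRank.get? t = some 0) ∨
    (t = "TERMINATION" ∧ pvRank.get? t = some 1) ∨
    (t = "CONFIDENTIAL" ∧ pvRank.get? t = some 2) ∨
    (t = "IP" ∧ pvRank.get? t = some 3) ∨
    (t = "PAYMENT" ∧ pvRank.get? t = some 4) ∨
    (t = "INDEMNITY" ∧ pvRank.get? t = some 5) ∨
    (t = "COMPLIANCE" ∧ pvRank.get? t = some 6) ∨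
    (t = "DISPUTE" ∧ pvRank.get? t = some 7) := by
  by_cases h0 : t = "LIABILITY"
  · subst h0; right; left
    exact ⟨rfl, by decide⟩
  by_cases h1 : t = "TERMINATION"
  · subst h1; right; right; left
    exact ⟨rfl, by decide⟩
  by_cases h2 : t = "CONFIDENTIAL"
  · subst h2; right; right; right; left
    exact ⟨rfl, by decide⟩
  by_cases h3 : t = "IP"
  · subst h3; right; right; right; right; left
    exact ⟨rfl, by decide⟩
  by_cases h4 : t = "PAYMENT"
  · subst h4; right; right; right; right; right; left
    exact ⟨rfl, by decide⟩
  by_cases h5 : t = "INDEMNITY"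
  · subst h5; right; right; right; right; right; right; left
    exact ⟨rfl, by decide⟩
  by_cases h6 : t = "COMPLIANCE"
  · subst h6; right; right; right; right; right; right; right; left
    exact ⟨rfl, by decide⟩
  by_cases h7 : t = "DISPUTE"
  · subst h7; right; right; right; right; right; right; right; right
    exact ⟨rfl, by decide⟩
  · left
    apply (PySem.Dict.get?_eq_none_iff_not_mem_keys pvRank t).mpr
    have hkeys : pvRank.keys = ["LIABILITY", "TERMINATION", "CONFIDENTIAL", "IP",
        "PAYMENT", "INDEMNITY", "COMPLIANCE", "DISPUTE"] := by decide
    rw [hkeys]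
    simp [h0, h1, h2, h3, h4, h5, h6, h7]

-- characterization of B's fold as a priority-ordered decision tree
lemma pvLoopB_char (tags : List String) : ∀ (b : Option String) (r : Int),
    pvLoopB tags b r =
      if 0 < r ∧ tags.contains "LIABILITY" = true then (some "LIABILITY", 0)
      else if 1 < r ∧ tags.contains "TERMINATION" = true then (some "TERMINATION", 1)
      else if 2 < r ∧ tags.contains "CONFIDENTIAL" = true then (some "CONFIDENTIAL", 2)
      else if 3 < r ∧ tags.contains "IP" = true then (some "IP", 3)
      else if 4 < r ∧ tags.contains "PAYMENT" = true then (some "PAYMENT", 4)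
      else if 5 < r ∧ tags.contains "INDEMNITY" = true then (some "INDEMNITY", 5)
      else if 6 < r ∧ tags.contains "COMPLIANCE" = true then (some "COMPLIANCE", 6)
      else if 7 < r ∧ tags.contains "DISPUTE" = true then (some "DISPUTE", 7)
      else (b, r) := by
  induction tags with
  | nil => intro b r; simp [pvLoopB]
  | cons t rest ih =>
    intro b r
    rcases pvRank_cases t with h | ⟨ht, h⟩ | ⟨ht, h⟩ | ⟨ht, h⟩ | ⟨ht, h⟩ | ⟨ht, h⟩ | ⟨ht, h⟩ | ⟨ht, h⟩ | ⟨ht, h⟩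
    · have hk := (PySem.Dict.get?_eq_none_iff_not_mem_keys pvRank t).mp h
      have hkeys : pvRank.keys = ["LIABILITY", "TERMINATION", "CONFIDENTIAL", "IP",
          "PAYMENT", "INDEMNITY", "COMPLIANCE", "DISPUTE"] := by decide
      rw [hkeys] at hk
      simp only [List.mem_cons, List.not_mem_nil, or_false, not_or] at hk
      obtain ⟨n0, n1, n2, n3, n4, n5, n6, n7⟩ := hk
      simp only [pvLoopB, h]
      rw [ih]
      simp [Ne.symm n0, Ne.symm n1, Ne.symm n2, Ne.symm n3,
        Ne.symm n4, Ne.symm n5, Ne.symm n6, Ne.symm n7]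
    · subst ht
      simp only [pvLoopB, h]
      by_cases hr : (0:Int) < r
      · simp only [if_pos hr]
        rw [ih]
        -- no lower bounds needed
        simp [hr]
      · simp only [if_neg hr]
        rw [ih]
        simp [hr]
    · subst ht
      simp only [pvLoopB, h]
      by_cases hr : (1:Int) < r
      · simp only [if_pos hr]
        rw [ih]
        have g0 : (0:Int) < r := by omega
        simp [hr, g0]
      · simp only [if_neg hr]
        rw [ih]
        simp [hr]
    · subst ht
      simp only [pvLoopB, h]
      by_cases hr : (2:Int) < r
      · simp only [if_pos hr]
        rw [ih]
        have g0 : (0:Int) < r := by omega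
        have g1 : (1:Int) < r := by omega
        simp [hr, g0, g1]
      · simp only [if_neg hr]
        rw [ih]
        simp [hr]
    · subst ht
      simp only [pvLoopB, h]
      by_cases hr : (3:Int) < r
      · simp only [if_pos hr]
        rw [ih]
        have g0 : (0:Int) < r := by omega
        have g1 : (1:Int) < r := by omega
        have g2 : (2:Int) < r := by omega
        simp [hr, g0, g1, g2]
      · simp only [if_neg hr]
        rw [ih]
        simp [hr]
    · subst ht
      simp only [pvLoopB, h]
      by_cases hr : (4:Int) < r
      · simp only [if_pos hr]
        rw [ih]
        have g0 : (0:Int) < r := by omega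
        have g1 : (1:Int) < r := by omega
        have g2 : (2:Int) < r := by omega
        have g3 : (3:Int) < r := by omega
        simp [hr, g0, g1, g2, g3]
      · simp only [if_neg hr]
        rw [ih]
        simp [hr]
    · subst ht
      simp only [pvLoopB, h]
      by_cases hr : (5:Int) < r
      · simp only [if_pos hr]
        rw [ih]
        have g0 : (0:Int) < r := by omega
        have g1 : (1:Int) < r := by omega
        have g2 : (2:Int) < r := by omega
        have g3 : (3:Int) < r := by omega
        have g4 : (4:Int) < r := by omega
        simp [hr, g0, g1, g2, g3, g4]
      · simp only [if_neg hr]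
        rw [ih]
        simp [hr]
    · subst ht
      simp only [pvLoopB, h]
      by_cases hr : (6:Int) < r
      · simp only [if_pos hr]
        rw [ih]
        have g0 : (0:Int) < r := by omega
        have g1 : (1:Int) < r := by omega
        have g2 : (2:Int) < r := by omega
        have g3 : (3:Int) < r := by omega
        have g4 : (4:Int) < r := by omega
        have g5 : (5:Int) < r := by omega
        simp [hr, g0, g1, g2, g3, g4, g5]
      · simp only [if_neg hr]
        rw [ih]
        simp [hr]
    · subst ht
      simp only [pvLoopB, h]
      by_cases hr : (7:Int) < r
      · simp only [if_pos hr]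
        rw [ih]
        have g0 : (0:Int) < r := by omega
        have g1 : (1:Int) < r := by omega
        have g2 : (2:Int) < r := by omega
        have g3 : (3:Int) < r := by omega
        have g4 : (4:Int) < r := by omega
        have g5 : (5:Int) < r := by omega
        have g6 : (6:Int) < r := by omega
        simp [hr, g0, g1, g2, g3, g4, g5, g6]
      · simp only [if_neg hr]
        rw [ih]
        simp [hr]

-- ===== VERDICT (by name: the statement is the Claim_ definition above) =====
theorem get_canonical_domain_spec : Claim_equal_get_canonical_domain := by
  intro tags _
  unfold Spec_get_canonical_domain get_canonical_domain get_canonical_domain_alt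
  rw [pvLoopB_char]
  simp only [pvPriority, pvLoopA]
  norm_num
  split_ifs <;> simp_all
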